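-- pv_equiv track=rewrite | github.com/Held0fTheWelt/BLACKVEIN | MVP/backend/app/services/ai_stack_closure_cockpit_service.py | _extract_level_reason
-- ===== SOURCE A (Python) =====
-- def _extract_level_reason(markdown_text: str, heading: str) -> str:
--     heading_line = f"### {heading}"
--     if heading_line not in markdown_text:
--         return "No authoritative rationale found."
--     segment = markdown_text.split(heading_line, maxsplit=1)[1]
--     reason_lines: list[str] = []
--     started = False
--     for line in segment.splitlines():
--         stripped = line.strip()
--         if stripped.startswith("### "):
--             break
--         if stripped.startswith("Reason:"):
--             started = True
--         if started and stripped: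
--             reason_lines.append(stripped)
--             if len(reason_lines) >= 2:
--                 break
--     if reason_lines:
--         return " ".join(reason_lines)
--     return "No explicit reason paragraph found."
-- ===== SOURCE B (Python) =====
-- def _extract_level_reason(markdown_text: str, heading: str) -> str:
--     heading_line = f"### {heading}"
--     if heading_line not in markdown_text:
--         return "No authoritative rationale found."
--     segment = markdown_text.split(heading_line, maxsplit=1)[1]
--     # Build the whole stripped subsection up to the next heading first.
--     subsection: list[str] = []
--     for line in segment.splitlines():
--         stripped = line.strip()
--         if stripped.startswith("### "):
--             break
--         subsection.append(stripped)
--     # Find the first 'Reason:' line, then slice / filter / cap.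
--     idx = next((i for i, s in enumerate(subsection) if s.startswith("Reason:")), None)
--     if idx is None:
--         return "No explicit reason paragraph found."
--     return " ".join([s for s in subsection[idx:] if s][:2])
-- ===== Notes on version B (the rewrite author's own statement) =====
-- stated objective: alternative
-- what changed: Replaces A's single stateful loop (started flag, accumulator, two break points) by a three-stage decomposition: build the whole stripped subsection up to the next '### ' heading, index-find the first 'Reason:' line, then slice, filter empties and cap at two lines.
import Mathlib
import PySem

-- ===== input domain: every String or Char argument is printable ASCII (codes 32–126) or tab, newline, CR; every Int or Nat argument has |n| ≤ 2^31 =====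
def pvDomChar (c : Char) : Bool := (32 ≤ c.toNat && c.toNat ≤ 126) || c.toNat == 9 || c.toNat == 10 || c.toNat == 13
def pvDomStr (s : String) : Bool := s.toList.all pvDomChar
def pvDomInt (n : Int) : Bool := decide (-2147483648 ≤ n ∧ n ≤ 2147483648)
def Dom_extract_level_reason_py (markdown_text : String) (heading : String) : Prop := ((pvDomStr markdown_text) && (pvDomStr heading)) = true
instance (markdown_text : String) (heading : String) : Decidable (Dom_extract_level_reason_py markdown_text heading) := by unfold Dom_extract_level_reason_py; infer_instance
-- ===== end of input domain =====

-- B replaces A's stateful accumulate-with-flag loop by a decomposition: build the whole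
-- stripped subsection, index-find the first 'Reason:' line, then slice/filter/cap (alternative).

-- ===== PORT A =====
-- A's for-loop over segment.splitlines() with state (reason_lines, started) and two breaks
def pvStripLoopA : List (List Char) → List (List Char) → Bool → List (List Char)
  | [], reason_lines, _ => reason_lines
  | line :: rest, reason_lines, started =>
    let stripped := PySem.Chars.strip line
    if PySem.Chars.startswith stripped "### ".toList then reason_lines
    else
      let started' := started || PySem.Chars.startswith stripped "Reason:".toList
      if started' && !stripped.isEmpty then
        let reason_lines' := reason_lines ++ [stripped]
        if 2 ≤ reason_lines'.length then reason_lines'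
        else pvStripLoopA rest reason_lines' started'
      else pvStripLoopA rest reason_lines started'

def extract_level_reason_py (markdown_text : String) (heading : String) : String :=
  let heading_line := "### ".toList ++ heading.toList
  if !(PySem.Chars.isIn heading_line markdown_text.toList) then
    "No authoritative rationale found."
  else
    -- split(heading_line, maxsplit=1)[1]: heading_line is nonempty and present, so both getD defaults are unreachable
    let segment := (PySem.List.pyGet? ((PySem.Chars.splitMax? markdown_text.toList heading_line 1).getD []) 1).getD []
    let reason_lines := pvStripLoopA (PySem.Chars.splitlines segment) [] false
    if reason_lines ≠ [] then String.ofList (PySem.Chars.join [' '] reason_lines)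
    else "No explicit reason paragraph found."

-- ===== PORT B =====
-- B first builds the whole stripped subsection up to the next '### ' heading
def pvSubsection : List (List Char) → List (List Char)
  | [] => []
  | line :: rest =>
    let stripped := PySem.Chars.strip line
    if PySem.Chars.startswith stripped "### ".toList then []
    else stripped :: pvSubsection rest

def extract_level_reason_py_alt (markdown_text : String) (heading : String) : String :=
  let heading_line := "### ".toList ++ heading.toList
  if !(PySem.Chars.isIn heading_line markdown_text.toList) then
    "No authoritative rationale found."
  else
    let segment := (PySem.List.pyGet? ((PySem.Chars.splitMax? markdown_text.toList heading_line 1).getD []) 1).getD []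
    let subsection := pvSubsection (PySem.Chars.splitlines segment)
    match subsection.findIdx? (fun s => PySem.Chars.startswith s "Reason:".toList) with
    | none => "No explicit reason paragraph found."
    | some i => String.ofList (PySem.Chars.join [' '] (((subsection.drop i).filter (fun s => !s.isEmpty)).take 2))

-- ===== PRECONDITION & SPEC =====
def Spec_extract_level_reason_py (markdown_text : String) (heading : String) (out : String) : Prop := out = extract_level_reason_py_alt markdown_text heading
instance (markdown_text : String) (heading : String) (out : String) : Decidable (Spec_extract_level_reason_py markdown_text heading out) := by unfold Spec_extract_level_reason_py; infer_instance

-- ===== CLAIM (what is proved, stated in full; the proofs are below) =====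
def Claim_equal_extract_level_reason_py : Prop := ∀ (markdown_text : String) (heading : String), Dom_extract_level_reason_py markdown_text heading → Spec_extract_level_reason_py markdown_text heading (extract_level_reason_py markdown_text heading)

-- ===== LEMMAS AND PROOFS =====

theorem pvSharp_toList : ("### ".toList : List Char) = ['#', '#', '#', ' '] := by decide

theorem pvReason_toList : ("Reason:".toList : List Char) = ['R', 'e', 'a', 's', 'o', 'n', ':'] := by decide

-- once started, with one collected line, A collects at most one more non-empty stripped line
theorem pvStripLoopA_started (L : List (List Char)) (a : List Char) :
    pvStripLoopA L [a] true =
      a :: ((pvSubsection L).filter (fun s => !s.isEmpty)).take 1 := by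
  induction L with
  | nil => simp [pvStripLoopA, pvSubsection]
  | cons line rest ih =>
    simp only [pvStripLoopA, pvSubsection, pvSharp_toList, pvReason_toList]
    by_cases h : PySem.Chars.startswith (PySem.Chars.strip line) ['#', '#', '#', ' '] = true
    · simp [h]
    · simp only [h, Bool.true_or]
      by_cases hne : (PySem.Chars.strip line).isEmpty = true
      · simp [hne, ih]
      · simp [hne]

theorem startswith_ne_nil {s p : List Char} (hp : p ≠ [])
    (h : PySem.Chars.startswith s p = true) : s ≠ [] := by
  rw [PySem.Chars.startswith_iff] at h
  rintro rfl
  simp [List.prefix_nil] at h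
  exact hp h

-- A's whole loop from the initial state, phrased as B's find-then-slice computation
theorem pvStripLoopA_eq (L : List (List Char)) :
    pvStripLoopA L [] false =
      (match (pvSubsection L).findIdx? (fun s => PySem.Chars.startswith s "Reason:".toList) with
       | none => []
       | some i => (((pvSubsection L).drop i).filter (fun s => !s.isEmpty)).take 2) := by
  induction L with
  | nil => simp [pvStripLoopA, pvSubsection]
  | cons line rest ih =>
    simp only [pvStripLoopA, pvSubsection, pvSharp_toList, pvReason_toList]
    by_cases h : PySem.Chars.startswith (PySem.Chars.strip line) ['#', '#', '#', ' '] = true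
    · simp [h]
    · simp only [h, Bool.false_or]
      by_cases hr : PySem.Chars.startswith (PySem.Chars.strip line) ['R', 'e', 'a', 's', 'o', 'n', ':'] = true
      · have hne : (PySem.Chars.strip line) ≠ [] :=
          startswith_ne_nil (by decide) hr
        have hne' : (PySem.Chars.strip line).isEmpty = false := by
          simpa [List.isEmpty_iff] using hne
        simp [hr, hne', List.findIdx?_cons, pvStripLoopA_started]
      · simp only [hr, Bool.false_and]
        rw [ih]
        simp only [pvReason_toList]
        cases hfi : (pvSubsection rest).findIdx?
            (fun s => PySem.Chars.startswith s ['R', 'e', 'a', 's', 'o', 'n', ':']) with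
        | none => simp [List.findIdx?_cons, hr, hfi]
        | some i => simp [List.findIdx?_cons, hr, hfi]

theorem findIdx?_drop_shape {α : Type} (p : α → Bool) (xs : List α) (i : ℕ)
    (h : xs.findIdx? p = some i) :
    ∃ r t, xs.drop i = r :: t ∧ p r = true := by
  have hi := List.findIdx?_eq_some_iff_findIdx_eq.mp h
  obtain ⟨hlt, _⟩ := hi
  refine ⟨xs[i], xs.drop (i+1), ?_, ?_⟩
  · exact List.drop_eq_getElem_cons hlt
  · have := List.findIdx?_eq_some_iff_getElem.mp h
    obtain ⟨_, hp, _⟩ := this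
    simpa using hp

-- ===== VERDICT (by name: the statement is the Claim_ definition above) =====
theorem extract_level_reason_py_spec : Claim_equal_extract_level_reason_py := by
  intro markdown_text heading _
  unfold Spec_extract_level_reason_py extract_level_reason_py extract_level_reason_py_alt
  simp only [pvSharp_toList, pvReason_toList, List.cons_append, List.nil_append]
  by_cases hin : PySem.Chars.isIn ('#' :: '#' :: '#' :: ' ' :: heading.toList) markdown_text.toList = true
  · simp only [hin, Bool.not_true]
    set G := PySem.Chars.splitlines
      ((PySem.List.pyGet? ((PySem.Chars.splitMax? markdown_text.toList
        ('#' :: '#' :: '#' :: ' ' :: heading.toList) 1).getD []) 1).getD []) with hG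
    rw [pvStripLoopA_eq]
    simp only [pvReason_toList]
    cases hfi : (pvSubsection G).findIdx?
        (fun s => PySem.Chars.startswith s ['R', 'e', 'a', 's', 'o', 'n', ':']) with
    | none => simp [hfi]
    | some i =>
      obtain ⟨r, t, hdrop, hp⟩ := findIdx?_drop_shape _ _ _ hfi
      have hrne : r ≠ [] := startswith_ne_nil (by decide) hp
      have hrne' : r.isEmpty = false := by simpa [List.isEmpty_iff] using hrne
      simp [hdrop, hrne']
  · simp [hin]
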